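-- pv_equiv track=rewrite | github.com/Siddharth-lal-13/Reddit-Analysis-Dashboard | src/main.py | summarize_topics
-- ===== SOURCE A (Python) =====
-- def summarize_topics(topics):
--     topic_summaries = []
--     used_summaries = set()  # Track used summaries to avoid duplicates
--     for topic in topics[:3]:  # Top 3 topics
--         words = topic.split(', ')[:5]  # First 5 words for brevity
--         summary = None
--
--         # Political/Governance Themes
--         if any(w in words for w in ['government', 'trump', 'president', 'administration', 'state', 'federal']):
--             summary = "Political Leadership and Governance"
--         # Community Action/Protests
--         elif any(w in words for w in ['protest', 'action', 'movement', 'rally']):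
--             summary = "Community Action and Protests"
--         # Social Media/Content
--         elif any(w in words for w in ['video', 'instagram', 'https', 'www', 'content', 'share']):
--             summary = "Social Media and Content Sharing"
--         # Ideological Discourse
--         elif any(w in words for w in ['anarchism', 'conservative', 'ideology', 'theory', 'policy']):
--             summary = "Ideological Perspectives and Debate"
--         # Personal Expression/Opinion
--         elif any(w in words for w in ['think', 'know', 'want', 'like', 'people', 'right']):
--             summary = "Personal Opinions and Community Sentiment"
--         # Default with contextual twist
--         else:
--             # Use the most frequent word as a hint
--             top_word = words[0] if words else "Discussion"
--             summary = f"Emerging {top_word.capitalize()} Trends"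
--
--         # Ensure uniqueness
--         if summary in used_summaries:
--             summary = f"Additional {summary.split(' and ')[0]} Insights" if ' and ' in summary else f"Broader {summary}"
--         used_summaries.add(summary)
--         topic_summaries.append(summary)
--
--     return topic_summaries
-- ===== SOURCE B (Python) =====
-- # B: inverts the matching direction -- instead of scanning rule keyword groups in
-- # priority order asking "does any keyword occur among the words", it builds a single
-- # keyword -> (priority, label) index once and, per topic, looks each word up in the
-- # index keeping the hit of minimal priority; dedup-rewriting is done recursively.
--
-- KEYWORD_INDEX = {}
-- for _priority, (_kws, _label) in enumerate([
--     (('government', 'trump', 'president', 'administration', 'state', 'federal'),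
--      "Political Leadership and Governance"),
--     (('protest', 'action', 'movement', 'rally'),
--      "Community Action and Protests"),
--     (('video', 'instagram', 'https', 'www', 'content', 'share'),
--      "Social Media and Content Sharing"),
--     (('anarchism', 'conservative', 'ideology', 'theory', 'policy'),
--      "Ideological Perspectives and Debate"),
--     (('think', 'know', 'want', 'like', 'people', 'right'),
--      "Personal Opinions and Community Sentiment"),
-- ]):
--     for _w in _kws:
--         KEYWORD_INDEX[_w] = (_priority, _label)
--
--
-- def summarize_topics(topics):
--     def label_of(topic):
--         words = topic.split(', ')[:5]
--         best = None
--         for w in words: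
--             hit = KEYWORD_INDEX.get(w)
--             if hit is not None and (best is None or hit[0] < best[0]):
--                 best = hit
--         if best is not None:
--             return best[1]
--         head = words[0] if words else "Discussion"
--         return f"Emerging {head.capitalize()} Trends"
--
--     def dedup(labels, used):
--         if not labels:
--             return []
--         s = labels[0]
--         if s in used:
--             s = f"Additional {s.split(' and ')[0]} Insights" if ' and ' in s else f"Broader {s}"
--         return [s] + dedup(labels[1:], used | {s})
--
--     return dedup([label_of(t) for t in topics[:3]], frozenset())
-- ===== Notes on version B (the rewrite author's own statement) =====
-- stated objective: alternative
-- what changed: Instead of A's if/elif scan over the five keyword groups per topic, B builds a single keyword->(priority,label) index once and per topic looks each word up in it keeping the minimal-priority hit, and the seen-set dedup loop becomes a recursion over the label list.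
import Mathlib
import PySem

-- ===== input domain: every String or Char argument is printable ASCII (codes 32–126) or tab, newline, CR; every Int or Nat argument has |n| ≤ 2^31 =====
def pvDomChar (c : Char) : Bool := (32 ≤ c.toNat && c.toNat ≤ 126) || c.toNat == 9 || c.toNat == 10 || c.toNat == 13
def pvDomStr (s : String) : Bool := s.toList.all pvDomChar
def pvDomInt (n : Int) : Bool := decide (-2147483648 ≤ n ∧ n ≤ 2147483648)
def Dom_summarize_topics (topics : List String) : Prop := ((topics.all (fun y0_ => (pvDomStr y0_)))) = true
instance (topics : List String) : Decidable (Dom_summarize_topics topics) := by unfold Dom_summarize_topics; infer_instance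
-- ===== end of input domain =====

-- B inverts A's matching direction: it builds one keyword -> (priority, label) index and
-- per topic keeps the minimal-priority hit among its words (instead of scanning the five
-- keyword groups in priority order), and does the dedup rewriting recursively
-- (objective: alternative lookup-based algorithm; same cost on this fixed rule set).

-- shared hand port of Python str.capitalize() (exact on ASCII: first char uppercased, rest lowercased)
def pyCapitalize (s : String) : String :=
  match s.toList with
  | [] => String.ofList []
  | c :: rest => String.ofList (PySem.Chars.upperChar c :: rest.map PySem.Chars.lowerChar)

-- ===== PORT A =====
def summarize_topics (topics : List String) : List String :=
  ((PySem.List.slice topics none (some 3)).foldl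
    (fun (st : List String × PySem.Set String) topic =>
      -- topic.split(', ')[:5]; the separator is non-empty so split? is always `some`
      let words := ((PySem.Str.split? topic ", ").getD []).take 5
      let summary :=
        if ["government", "trump", "president", "administration", "state", "federal"].any
            (fun w => words.contains w) then "Political Leadership and Governance"
        else if ["protest", "action", "movement", "rally"].any
            (fun w => words.contains w) then "Community Action and Protests"
        else if ["video", "instagram", "https", "www", "content", "share"].any
            (fun w => words.contains w) then "Social Media and Content Sharing"
        else if ["anarchism", "conservative", "ideology", "theory", "policy"].any
            (fun w => words.contains w) then "Ideological Perspectives and Debate"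
        else if ["think", "know", "want", "like", "people", "right"].any
            (fun w => words.contains w) then "Personal Opinions and Community Sentiment"
        else
          let top_word := match words with | [] => "Discussion" | w :: _ => w
          "Emerging " ++ pyCapitalize top_word ++ " Trends"
      let summary :=
        if PySem.Set.contains st.2 summary then
          if PySem.Str.isIn " and " summary then
            "Additional " ++ (((PySem.Str.split? summary " and ").getD []).headD "") ++ " Insights"
          else "Broader " ++ summary
        else summary
      (st.1 ++ [summary], PySem.Set.add st.2 summary))
    ([], PySem.Set.empty)).1

-- ===== PORT B =====
-- the rule list of Source B, in priority order
def pvRuleTable : List (List String × String) :=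
  [(["government", "trump", "president", "administration", "state", "federal"],
    "Political Leadership and Governance"),
   (["protest", "action", "movement", "rally"],
    "Community Action and Protests"),
   (["video", "instagram", "https", "www", "content", "share"],
    "Social Media and Content Sharing"),
   (["anarchism", "conservative", "ideology", "theory", "policy"],
    "Ideological Perspectives and Debate"),
   (["think", "know", "want", "like", "people", "right"],
    "Personal Opinions and Community Sentiment")]

-- KEYWORD_INDEX: the module-level double loop filling the dict
def pvIndex : PySem.Dict String (Int × String) :=
  (PySem.List.enumerate pvRuleTable).foldl
    (fun d p => p.2.1.foldl (fun d w => d.insert w (p.1, p.2.2)) d)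
    PySem.Dict.empty

-- the body of B's `for w in words` loop: keep the minimal-priority hit
-- (`hit[0] < best[0]`: the first hit wins a tie, as in Source B)
def pvBestStep (best : Option (Int × String)) (w : String) : Option (Int × String) :=
  match PySem.Dict.get? pvIndex w with
  | none => best
  | some hit =>
    match best with
    | none => some hit
    | some b => if hit.1 < b.1 then some hit else some b

-- Source B's label_of
def pvBestLabel (words : List String) : String :=
  match words.foldl pvBestStep none with
  | some b => b.2
  | none =>
    let head := match words with | [] => "Discussion" | w :: _ => w
    "Emerging " ++ pyCapitalize head ++ " Trends"

def pvLabelOf (topic : String) : String :=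
  pvBestLabel (((PySem.Str.split? topic ", ").getD []).take 5)

-- Source B's recursive dedup; `used | {s}` is PySem.Set.add used s (union with the singleton)
def pvDedup : List String → PySem.Set String → List String
  | [], _ => []
  | s :: rest, used =>
    let s' :=
      if PySem.Set.contains used s then
        if PySem.Str.isIn " and " s then
          "Additional " ++ (((PySem.Str.split? s " and ").getD []).headD "") ++ " Insights"
        else "Broader " ++ s
      else s
    s' :: pvDedup rest (PySem.Set.add used s')

def summarize_topics_alt (topics : List String) : List String :=
  pvDedup ((PySem.List.slice topics none (some 3)).map pvLabelOf) PySem.Set.empty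

-- ===== PRECONDITION & SPEC =====
def Spec_summarize_topics (topics : List String) (out : List String) : Prop := out = summarize_topics_alt topics
instance (topics : List String) (out : List String) : Decidable (Spec_summarize_topics topics out) := by unfold Spec_summarize_topics; infer_instance

-- ===== CLAIM (what is proved, stated in full; the proofs are below) =====
def Claim_equal_summarize_topics : Prop := ∀ (topics : List String), Dom_summarize_topics topics → Spec_summarize_topics topics (summarize_topics topics)

-- ===== LEMMAS AND PROOFS =====

-- the keyword index as a literal association list
lemma pvIndex_eq : pvIndex = PySem.Dict.mk
    [("government", (0, "Political Leadership and Governance")),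
     ("trump", (0, "Political Leadership and Governance")),
     ("president", (0, "Political Leadership and Governance")),
     ("administration", (0, "Political Leadership and Governance")),
     ("state", (0, "Political Leadership and Governance")),
     ("federal", (0, "Political Leadership and Governance")),
     ("protest", (1, "Community Action and Protests")),
     ("action", (1, "Community Action and Protests")),
     ("movement", (1, "Community Action and Protests")),
     ("rally", (1, "Community Action and Protests")),
     ("video", (2, "Social Media and Content Sharing")),
     ("instagram", (2, "Social Media and Content Sharing")),
     ("https", (2, "Social Media and Content Sharing")),
     ("www", (2, "Social Media and Content Sharing")),
     ("content", (2, "Social Media and Content Sharing")),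
     ("share", (2, "Social Media and Content Sharing")),
     ("anarchism", (3, "Ideological Perspectives and Debate")),
     ("conservative", (3, "Ideological Perspectives and Debate")),
     ("ideology", (3, "Ideological Perspectives and Debate")),
     ("theory", (3, "Ideological Perspectives and Debate")),
     ("policy", (3, "Ideological Perspectives and Debate")),
     ("think", (4, "Personal Opinions and Community Sentiment")),
     ("know", (4, "Personal Opinions and Community Sentiment")),
     ("want", (4, "Personal Opinions and Community Sentiment")),
     ("like", (4, "Personal Opinions and Community Sentiment")),
     ("people", (4, "Personal Opinions and Community Sentiment")),
     ("right", (4, "Personal Opinions and Community Sentiment"))] := by decide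

-- the index lookup, characterised by keyword-group membership in priority order
set_option maxHeartbeats 1000000 in
lemma pvLook_eq (w : String) :
    PySem.Dict.get? pvIndex w =
      if ["government", "trump", "president", "administration", "state", "federal"].contains w then
        some ((0 : Int), "Political Leadership and Governance")
      else if ["protest", "action", "movement", "rally"].contains w then
        some ((1 : Int), "Community Action and Protests")
      else if ["video", "instagram", "https", "www", "content", "share"].contains w then
        some ((2 : Int), "Social Media and Content Sharing")
      else if ["anarchism", "conservative", "ideology", "theory", "policy"].contains w then
        some ((3 : Int), "Ideological Perspectives and Debate")
      else if ["think", "know", "want", "like", "people", "right"].contains w then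
        some ((4 : Int), "Personal Opinions and Community Sentiment")
      else none := by
  rw [pvIndex_eq]
  simp only [PySem.Dict.get?_mk_cons, List.contains_cons, List.contains_nil,
    Bool.or_false, Bool.or_eq_true, beq_iff_eq, @eq_comm String w]
  by_cases h1 : "government" = w
  · simp [h1]
  by_cases h2 : "trump" = w
  · simp [h1, h2]
  by_cases h3 : "president" = w
  · simp [h1, h2, h3]
  by_cases h4 : "administration" = w
  · simp [h1, h2, h3, h4]
  by_cases h5 : "state" = w
  · simp [h1, h2, h3, h4, h5]
  by_cases h6 : "federal" = w
  · simp [h1, h2, h3, h4, h5, h6]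
  by_cases h7 : "protest" = w
  · simp [h1, h2, h3, h4, h5, h6, h7]
  by_cases h8 : "action" = w
  · simp [h1, h2, h3, h4, h5, h6, h7, h8]
  by_cases h9 : "movement" = w
  · simp [h1, h2, h3, h4, h5, h6, h7, h8, h9]
  by_cases h10 : "rally" = w
  · simp [h1, h2, h3, h4, h5, h6, h7, h8, h9, h10]
  by_cases h11 : "video" = w
  · simp [h1, h2, h3, h4, h5, h6, h7, h8, h9, h10, h11]
  by_cases h12 : "instagram" = w
  · simp [h1, h2, h3, h4, h5, h6, h7, h8, h9, h10, h11, h12]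
  by_cases h13 : "https" = w
  · simp [h1, h2, h3, h4, h5, h6, h7, h8, h9, h10, h11, h12, h13]
  by_cases h14 : "www" = w
  · simp [h1, h2, h3, h4, h5, h6, h7, h8, h9, h10, h11, h12, h13, h14]
  by_cases h15 : "content" = w
  · simp [h1, h2, h3, h4, h5, h6, h7, h8, h9, h10, h11, h12, h13, h14, h15]
  by_cases h16 : "share" = w
  · simp [h1, h2, h3, h4, h5, h6, h7, h8, h9, h10, h11, h12, h13, h14, h15, h16]
  by_cases h17 : "anarchism" = w
  · simp [h1, h2, h3, h4, h5, h6, h7, h8, h9, h10, h11, h12, h13, h14, h15, h16, h17]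
  by_cases h18 : "conservative" = w
  · simp [h1, h2, h3, h4, h5, h6, h7, h8, h9, h10, h11, h12, h13, h14, h15, h16, h17, h18]
  by_cases h19 : "ideology" = w
  · simp [h1, h2, h3, h4, h5, h6, h7, h8, h9, h10, h11, h12, h13, h14, h15, h16, h17, h18, h19]
  by_cases h20 : "theory" = w
  · simp [h1, h2, h3, h4, h5, h6, h7, h8, h9, h10, h11, h12, h13, h14, h15, h16, h17, h18, h19, h20]
  by_cases h21 : "policy" = w
  · simp [h1, h2, h3, h4, h5, h6, h7, h8, h9, h10, h11, h12, h13, h14, h15, h16, h17, h18, h19, h20, h21]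
  by_cases h22 : "think" = w
  · simp [h1, h2, h3, h4, h5, h6, h7, h8, h9, h10, h11, h12, h13, h14, h15, h16, h17, h18, h19, h20, h21, h22]
  by_cases h23 : "know" = w
  · simp [h1, h2, h3, h4, h5, h6, h7, h8, h9, h10, h11, h12, h13, h14, h15, h16, h17, h18, h19, h20, h21, h22, h23]
  by_cases h24 : "want" = w
  · simp [h1, h2, h3, h4, h5, h6, h7, h8, h9, h10, h11, h12, h13, h14, h15, h16, h17, h18, h19, h20, h21, h22, h23, h24]
  by_cases h25 : "like" = w
  · simp [h1, h2, h3, h4, h5, h6, h7, h8, h9, h10, h11, h12, h13, h14, h15, h16, h17, h18, h19, h20, h21, h22, h23, h24, h25]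
  by_cases h26 : "people" = w
  · simp [h1, h2, h3, h4, h5, h6, h7, h8, h9, h10, h11, h12, h13, h14, h15, h16, h17, h18, h19, h20, h21, h22, h23, h24, h25, h26]
  by_cases h27 : "right" = w
  · simp [h1, h2, h3, h4, h5, h6, h7, h8, h9, h10, h11, h12, h13, h14, h15, h16, h17, h18, h19, h20, h21, h22, h23, h24, h25, h26, h27]
  simp [h1, h2, h3, h4, h5, h6, h7, h8, h9, h10, h11, h12, h13, h14, h15, h16, h17, h18, h19, h20, h21, h22, h23, h24, h25, h26, h27, PySem.Dict.get?]

-- left-biased minimum-by-priority on optional hits; pvBestStep best w = pvMerge best (lookup w)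
def pvMerge (b o : Option (Int × String)) : Option (Int × String) :=
  match o with
  | none => b
  | some h =>
    match b with
    | none => some h
    | some b' => if h.1 < b'.1 then some h else some b'

lemma pvBestStep_eq_merge (b : Option (Int × String)) (w : String) :
    pvBestStep b w = pvMerge b (PySem.Dict.get? pvIndex w) := by
  unfold pvBestStep pvMerge
  cases PySem.Dict.get? pvIndex w <;> cases b <;> rfl

lemma pvMerge_none_left (o : Option (Int × String)) : pvMerge none o = o := by
  cases o <;> rfl

lemma pvMerge_assoc (a b c : Option (Int × String)) :
    pvMerge (pvMerge a b) c = pvMerge a (pvMerge b c) := by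
  cases a <;> cases b <;> cases c <;> simp only [pvMerge] <;>
    (repeat' (split_ifs <;> simp_all)) <;> omega

lemma foldl_bestStep (words : List String) (b : Option (Int × String)) :
    words.foldl pvBestStep b = pvMerge b (words.foldl pvBestStep none) := by
  induction words generalizing b with
  | nil => rfl
  | cons w rest ih =>
    simp only [List.foldl_cons]
    rw [ih (pvBestStep b w), ih (pvBestStep none w),
        pvBestStep_eq_merge, pvBestStep_eq_merge none, pvMerge_none_left, pvMerge_assoc]

-- A's condition for one keyword group
def pvHit (kws words : List String) : Bool := kws.any (fun w => words.contains w)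

lemma pvHit_cons (kws : List String) (w : String) (rest : List String) :
    pvHit kws (w :: rest) = (kws.contains w || pvHit kws rest) := by
  rw [Bool.eq_iff_iff]
  simp only [pvHit, List.any_eq_true, List.contains_eq_mem, List.mem_cons,
    Bool.or_eq_true, decide_eq_true_eq]
  aesop

-- A's if/elif chain as an optional (priority, label)
def pvChainOpt (words : List String) : Option (Int × String) :=
  if pvHit ["government", "trump", "president", "administration", "state", "federal"] words then
    some ((0 : Int), "Political Leadership and Governance")
  else if pvHit ["protest", "action", "movement", "rally"] words then
    some ((1 : Int), "Community Action and Protests")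
  else if pvHit ["video", "instagram", "https", "www", "content", "share"] words then
    some ((2 : Int), "Social Media and Content Sharing")
  else if pvHit ["anarchism", "conservative", "ideology", "theory", "policy"] words then
    some ((3 : Int), "Ideological Perspectives and Debate")
  else if pvHit ["think", "know", "want", "like", "people", "right"] words then
    some ((4 : Int), "Personal Opinions and Community Sentiment")
  else none

-- B's minimal-priority fold computes exactly the first matching rule
set_option maxHeartbeats 2000000 in
lemma bestFold_eq_chainOpt (words : List String) :
    words.foldl pvBestStep none = pvChainOpt words := by
  induction words with
  | nil => simp [pvChainOpt, pvHit]
  | cons w rest ih =>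
    rw [List.foldl_cons, foldl_bestStep, ih, pvBestStep_eq_merge none, pvMerge_none_left,
      pvLook_eq]
    unfold pvChainOpt
    simp only [pvHit_cons, Bool.or_eq_true]
    split_ifs <;> simp_all [pvMerge]

-- A's chain as a function of the word list
def pvChainWords (words : List String) : String :=
  if pvHit ["government", "trump", "president", "administration", "state", "federal"] words then
    "Political Leadership and Governance"
  else if pvHit ["protest", "action", "movement", "rally"] words then
    "Community Action and Protests"
  else if pvHit ["video", "instagram", "https", "www", "content", "share"] words then
    "Social Media and Content Sharing"
  else if pvHit ["anarchism", "conservative", "ideology", "theory", "policy"] words then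
    "Ideological Perspectives and Debate"
  else if pvHit ["think", "know", "want", "like", "people", "right"] words then
    "Personal Opinions and Community Sentiment"
  else
    "Emerging " ++ pyCapitalize (match words with | [] => "Discussion" | w :: _ => w) ++ " Trends"

lemma pvBestLabel_eq (words : List String) : pvBestLabel words = pvChainWords words := by
  unfold pvBestLabel pvChainWords
  rw [bestFold_eq_chainOpt]
  unfold pvChainOpt
  split_ifs <;> rfl

-- the dedup rewriting A and B share
def pvRewrite (used : PySem.Set String) (s : String) : String :=
  if PySem.Set.contains used s then
    if PySem.Str.isIn " and " s then
      "Additional " ++ (((PySem.Str.split? s " and ").getD []).headD "") ++ " Insights"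
    else "Broader " ++ s
  else s

lemma pvDedup_cons (s : String) (rest : List String) (used : PySem.Set String) :
    pvDedup (s :: rest) used = pvRewrite used s :: pvDedup rest (PySem.Set.add used (pvRewrite used s)) := rfl

-- A's fold, from any state, is the accumulator followed by B's recursive dedup of B's labels
lemma fold_eq_dedup (ts : List String) (acc : List String) (used : PySem.Set String) :
    (ts.foldl
      (fun (st : List String × PySem.Set String) topic =>
        let words := ((PySem.Str.split? topic ", ").getD []).take 5
        let summary :=
          if ["government", "trump", "president", "administration", "state", "federal"].any
              (fun w => words.contains w) then "Political Leadership and Governance"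
          else if ["protest", "action", "movement", "rally"].any
              (fun w => words.contains w) then "Community Action and Protests"
          else if ["video", "instagram", "https", "www", "content", "share"].any
              (fun w => words.contains w) then "Social Media and Content Sharing"
          else if ["anarchism", "conservative", "ideology", "theory", "policy"].any
              (fun w => words.contains w) then "Ideological Perspectives and Debate"
          else if ["think", "know", "want", "like", "people", "right"].any
              (fun w => words.contains w) then "Personal Opinions and Community Sentiment"
          else
            let top_word := match words with | [] => "Discussion" | w :: _ => w
            "Emerging " ++ pyCapitalize top_word ++ " Trends"
        let summary :=
          if PySem.Set.contains st.2 summary then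
            if PySem.Str.isIn " and " summary then
              "Additional " ++ (((PySem.Str.split? summary " and ").getD []).headD "") ++ " Insights"
            else "Broader " ++ summary
          else summary
        (st.1 ++ [summary], PySem.Set.add st.2 summary))
      (acc, used)).1 = acc ++ pvDedup (ts.map pvLabelOf) used := by
  induction ts generalizing acc used with
  | nil => simp [pvDedup]
  | cons t rest ih =>
    simp only [List.foldl_cons, List.map_cons, pvDedup_cons]
    have hl : pvLabelOf t = pvChainWords (((PySem.Str.split? t ", ").getD []).take 5) :=
      pvBestLabel_eq _
    rw [ih]
    simp only [hl, pvChainWords, pvHit, pvRewrite]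
    simp

-- ===== VERDICT (by name: the statement is the Claim_ definition above) =====
theorem summarize_topics_spec : Claim_equal_summarize_topics := by
  intro topics _
  show summarize_topics topics = summarize_topics_alt topics
  unfold summarize_topics summarize_topics_alt
  exact (fold_eq_dedup _ [] PySem.Set.empty).trans (List.nil_append _)
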